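-- pv_equiv track=rewrite | github.com/bingerjiang/latentAct | tools.py | constructPositives
-- ===== SOURCE A (Python) =====
-- def constructPositives (dataset):
--     '''
--     dataset: list of lists
--     current_sents: not the first of last sent in dialog
--     '''
--     # exclude dialogs that only have 2 utterances
--     long_dialogs = [el for el in dataset if len(el['turns'])>2]
--
--     current_sents = []
--     prev_sents = []
--     next_sents = []
--     #pdb.set_trace()
--
--     for dia in long_dialogs:
--         i = 1
--         dialog = dia['turns']
--         while i < len(dialog)-1:
--             current_sents.append(dialog[i])
--             prev_sents.append(dialog[i-1])
--             next_sents.append(dialog[i+1])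
--
--             i +=1
--
--     return current_sents, prev_sents, next_sents
-- ===== SOURCE B (Python) =====
-- def constructPositives(dataset):
--     # Simpler: one pass, bulk slice copies instead of a per-index while loop.
--     current_sents, prev_sents, next_sents = [], [], []
--     for dia in dataset:
--         turns = dia['turns']
--         if len(turns) > 2:
--             current_sents += turns[1:-1]
--             prev_sents += turns[:-2]
--             next_sents += turns[2:]
--     return current_sents, prev_sents, next_sents
-- ===== Notes on version B (the rewrite author's own statement) =====
-- stated objective: simpler
-- what changed: Replaces the filter-then-while-loop per-index triple construction with a single pass that bulk-extends the three outputs by slices turns[1:-1], turns[:-2], turns[2:].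
import Mathlib
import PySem

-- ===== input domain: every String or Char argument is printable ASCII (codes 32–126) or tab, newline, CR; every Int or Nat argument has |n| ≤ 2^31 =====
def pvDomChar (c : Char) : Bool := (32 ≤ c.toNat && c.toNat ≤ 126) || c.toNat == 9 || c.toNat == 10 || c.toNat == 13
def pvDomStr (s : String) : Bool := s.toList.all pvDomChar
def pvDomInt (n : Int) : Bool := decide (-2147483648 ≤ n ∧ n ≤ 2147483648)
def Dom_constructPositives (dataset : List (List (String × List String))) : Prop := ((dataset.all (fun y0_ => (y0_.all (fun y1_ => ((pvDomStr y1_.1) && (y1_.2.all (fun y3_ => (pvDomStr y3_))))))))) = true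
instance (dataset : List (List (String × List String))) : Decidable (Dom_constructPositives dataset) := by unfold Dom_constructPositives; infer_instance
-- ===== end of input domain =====

-- B is a simpler decomposition: one pass over the dialogs, extending the three outputs by
-- bulk slices turns[1:-1], turns[:-2], turns[2:], instead of A's filter plus per-index while loop.

-- ===== PORT A =====
-- the while loop 'while i < len(dialog)-1: append dialog[i], dialog[i-1], dialog[i+1]; i += 1';
-- i starts at 1 and only grows, so a Nat counter is exact; while the condition holds the three
-- indices are in range, so the `.getD ""` after pyGet? never supplies its default.
def cpLoopA (dialog : List String) (i : Nat) (cur prev nxt : List String) :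
    List String × List String × List String :=
  if i < dialog.length - 1 then
    cpLoopA dialog (i + 1)
      (cur ++ [(PySem.List.pyGet? dialog (i : Int)).getD ""])
      (prev ++ [(PySem.List.pyGet? dialog ((i : Int) - 1)).getD ""])
      (nxt ++ [(PySem.List.pyGet? dialog ((i : Int) + 1)).getD ""])
  else (cur, prev, nxt)
termination_by dialog.length - 1 - i

-- el['turns'] is a first-match association-list lookup; Pre_ guarantees the key exists
-- (the Python raises KeyError otherwise), so `.getD []` never supplies its default on admitted inputs.
def constructPositives (dataset : List (List (String × List String))) :
    List String × List String × List String :=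
  let long_dialogs := dataset.filter (fun el => ((el.lookup "turns").getD []).length > 2)
  long_dialogs.foldl
    (fun acc dia =>
      let dialog := (dia.lookup "turns").getD []
      cpLoopA dialog 1 acc.1 acc.2.1 acc.2.2)
    ([], [], [])

-- ===== PORT B =====
def constructPositives_alt (dataset : List (List (String × List String))) :
    List String × List String × List String :=
  dataset.foldl
    (fun acc dia =>
      let turns := (dia.lookup "turns").getD []
      if turns.length > 2 then
        (acc.1 ++ PySem.List.slice turns (some 1) (some (-1)),
         acc.2.1 ++ PySem.List.slice turns none (some (-2)),
         acc.2.2 ++ PySem.List.slice turns (some 2) none)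
      else acc)
    ([], [], [])

-- ===== PRECONDITION & SPEC =====
-- Pre_ excludes exactly the inputs where the Python A raises KeyError: a dialog without a
-- "turns" key (B raises there too).
def Pre_constructPositives (dataset : List (List (String × List String))) : Prop :=
  (dataset.all (fun el => (el.lookup "turns").isSome)) = true
instance (dataset : List (List (String × List String))) : Decidable (Pre_constructPositives dataset) := by
  unfold Pre_constructPositives; infer_instance

def pvWitness_constructPositives : (List (List (String × List String))) :=
  [[("turns", ["a", "b", "c"])], [("turns", ["x", "y"])]]

def Spec_constructPositives (dataset : List (List (String × List String))) (out : List String × List String × List String) : Prop := out = constructPositives_alt dataset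
instance (dataset : List (List (String × List String))) (out : List String × List String × List String) : Decidable (Spec_constructPositives dataset out) := by unfold Spec_constructPositives; infer_instance

-- ===== CLAIM (what is proved, stated in full; the proofs are below) =====
def Claim_equal_constructPositives : Prop := ∀ (dataset : List (List (String × List String))), Dom_constructPositives dataset → Pre_constructPositives dataset → Spec_constructPositives dataset (constructPositives dataset)

-- ===== LEMMAS AND PROOFS =====

-- A's while loop from index i appends the windows dialog[i..], dialog[i-1..], dialog[i+1..],
-- k = len-1-i elements each: a take/drop characterisation, by induction on k.
lemma cpLoopA_spec (dialog : List String) :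
    ∀ (k i : Nat) (cur prev nxt : List String), 1 ≤ i → k = dialog.length - 1 - i →
    cpLoopA dialog i cur prev nxt =
      (cur ++ (dialog.drop i).take k,
       prev ++ (dialog.drop (i - 1)).take k,
       nxt ++ (dialog.drop (i + 1)).take k) := by
  intro k
  induction k with
  | zero =>
    intro i cur prev nxt hi hk
    rw [cpLoopA]
    simp only [List.take_zero, List.append_nil]
    rw [if_neg (by omega)]
  | succ k ih =>
    intro i cur prev nxt hi hk
    have hlt : i < dialog.length - 1 := by omega
    have hidx : i < dialog.length := by omega
    rw [cpLoopA, if_pos hlt, ih (i + 1) _ _ _ (by omega) (by omega)]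
    have hget : (PySem.List.pyGet? dialog (i : Int)).getD "" = dialog[i] := by
      rw [PySem.List.pyGet?_natCast, List.getElem?_eq_getElem hidx]; rfl
    have hgetp : (PySem.List.pyGet? dialog ((i : Int) - 1)).getD "" = dialog[i - 1]'(by omega) := by
      have : ((i : Int) - 1) = ((i - 1 : Nat) : Int) := by omega
      rw [this, PySem.List.pyGet?_natCast, List.getElem?_eq_getElem (by omega)]; rfl
    have hgetn : (PySem.List.pyGet? dialog ((i : Int) + 1)).getD "" = dialog[i + 1]'(by omega) := by
      have : ((i : Int) + 1) = ((i + 1 : Nat) : Int) := by omega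
      rw [this, PySem.List.pyGet?_natCast, List.getElem?_eq_getElem (by omega)]; rfl
    have hwin : ∀ (j : Nat) (h : j < dialog.length),
        (dialog.drop j).take (k + 1) = dialog[j] :: (dialog.drop (j + 1)).take k := by
      intro j h
      rw [← List.getElem_cons_drop h, List.take_succ_cons]
    have hi1 : i - 1 + 1 = i := by omega
    rw [hget, hgetp, hgetn,
        hwin i hidx, hwin (i - 1) (by omega), hwin (i + 1) (by omega), hi1]
    simp [List.append_assoc]

-- turns[1:-1] as drop/take
lemma slice1 (turns : List String) (h : turns.length > 2) :
    PySem.List.slice turns (some 1) (some (-1)) =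
      (turns.drop 1).take (turns.length - 1 - 1) := by
  simp [PySem.List.slice, PySem.List.clampIdx, List.drop_one]
  rw [if_neg (by rintro rfl; simp at h), show min 1 turns.length = 1 by omega,
      List.drop_one]
  congr 1 <;> omega

-- turns[:-2] as take
lemma slice2 (turns : List String) (h : turns.length > 2) :
    PySem.List.slice turns none (some (-2)) = turns.take (turns.length - 1 - 1) := by
  rw [PySem.List.slice_to_neg_ofNat turns 2 (by omega)]
  congr 1

-- turns[2:] as drop/take
lemma slice3 (turns : List String) (h : turns.length > 2) :
    PySem.List.slice turns (some 2) none = (turns.drop 2).take (turns.length - 1 - 1) := by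
  rw [PySem.List.slice_from turns (a := 2) (by norm_num), show Int.toNat 2 = 2 from rfl,
      List.take_of_length_le (by simp; omega)]

-- the per-dialog step functions of the two ports agree on every dialog
lemma step_eq (acc : List String × List String × List String)
    (dia : List (String × List String)) :
    (if ((dia.lookup "turns").getD []).length > 2 then
      cpLoopA ((dia.lookup "turns").getD []) 1 acc.1 acc.2.1 acc.2.2
    else acc) =
    (let turns := (dia.lookup "turns").getD []
     if turns.length > 2 then
       (acc.1 ++ PySem.List.slice turns (some 1) (some (-1)),
        acc.2.1 ++ PySem.List.slice turns none (some (-2)),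
        acc.2.2 ++ PySem.List.slice turns (some 2) none)
     else acc) := by
  set turns := (dia.lookup "turns").getD [] with hturns
  by_cases h : turns.length > 2
  · rw [if_pos h]
    simp only [if_pos h]
    rw [cpLoopA_spec turns (turns.length - 1 - 1) 1 acc.1 acc.2.1 acc.2.2 le_rfl rfl,
        slice1 turns h, slice2 turns h, slice3 turns h]
    norm_num
  · simp [h]

-- ===== VERDICT (by name: the statement is the Claim_ definition above) =====
theorem constructPositives_spec : Claim_equal_constructPositives := by
  intro dataset _ _
  unfold Spec_constructPositives constructPositives constructPositives_alt
  rw [List.foldl_filter]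
  congr 1
  funext acc dia
  simpa using step_eq acc dia
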